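-- pv_equiv track=rewrite | github.com/leonsolon/coding-challenges | codility/lesson06/triangle/felippe_1.py | solution
-- ===== SOURCE A (Python) =====
-- from itertools import combinations
--
-- def solution(A):
--   for element in A:
--     if element < 0:   # retirando os elementos negativos
--       A.remove(element)
--   if len(A) < 3:
--     return 0
--   triangle = 0
--   for triple in combinations(A, 3):
--     if triple[0] + triple[1] > triple[2] and triple[1] + triple[2] > triple[0] and triple[0] + triple[2] > triple[1]:
--       triangle = 1
--   return triangle
-- ===== SOURCE B (Python) =====
-- def solution(A):
--     s = sorted(A)
--     for i in range(len(s) - 2):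
--         if s[i] + s[i + 1] > s[i + 2]:
--             return 1
--     return 0
-- ===== Notes on version B (the rewrite author's own statement) =====
-- stated objective: faster
-- what changed: B sorts the list once and checks only consecutive triples s[i]+s[i+1]>s[i+2], instead of A's negative-removal loop followed by a scan of all 3-element combinations.
import Mathlib
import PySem

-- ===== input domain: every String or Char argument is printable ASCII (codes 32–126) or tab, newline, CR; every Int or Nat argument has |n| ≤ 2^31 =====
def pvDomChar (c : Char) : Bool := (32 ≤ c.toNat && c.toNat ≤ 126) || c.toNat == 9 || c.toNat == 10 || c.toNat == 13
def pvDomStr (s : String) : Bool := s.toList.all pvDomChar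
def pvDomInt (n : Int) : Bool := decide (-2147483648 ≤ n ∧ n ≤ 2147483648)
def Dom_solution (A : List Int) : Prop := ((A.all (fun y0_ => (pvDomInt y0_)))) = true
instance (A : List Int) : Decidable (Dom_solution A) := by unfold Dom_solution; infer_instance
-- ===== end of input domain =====

-- B replaces A's O(n^3) scan of all 3-combinations by sort + one pass over consecutive
-- triples (objective: faster, asymptotic). NOTE: Python A mutates its argument (removes
-- negative elements in place); B does not — the equivalence proved here is about the
-- return value only.

-- ===== PORT A =====
-- A's mutate-while-iterating removal loop: the index i walks the *current* list;
-- A.remove(e) removes the first occurrence of e, and e = A[i] is in A, so remove = erase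
-- (PySem.List.remove?_eq_some_erase).
def removeLoop (xs : List Int) (i : Nat) : List Int :=
  if h : i < xs.length then
    if xs[i] < 0 then removeLoop (xs.erase xs[i]) (i + 1)
    else removeLoop xs (i + 1)
  else xs
termination_by xs.length - i
decreasing_by
  · have := List.length_erase_of_mem (List.getElem_mem h)
    omega
  · omega

-- itertools.combinations(l, 2) restricted to what combos3 needs
def pairs2 : List Int → List (Int × Int)
  | [] => []
  | y :: ys => ys.map (fun z => (y, z)) ++ pairs2 ys

-- itertools.combinations(l, 3), in Python's order
def combos3 : List Int → List (Int × Int × Int)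
  | [] => []
  | x :: xs => (pairs2 xs).map (fun p => (x, p.1, p.2)) ++ combos3 xs

def triCond (t : Int × Int × Int) : Bool :=
  decide (t.1 + t.2.1 > t.2.2) && decide (t.2.1 + t.2.2 > t.1) && decide (t.1 + t.2.2 > t.2.1)

def solution (A : List Int) : Int :=
  let A' := removeLoop A 0
  if A'.length < 3 then 0
  else (combos3 A').foldl (fun triangle tr => if triCond tr then 1 else triangle) 0

-- ===== PORT B =====
-- Source B's index loop over consecutive triples of the sorted list, with early return,
-- as the obvious structural recursion over the same triples in the same order.
def scan3 : List Int → Int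
  | a :: b :: c :: rest => if a + b > c then 1 else scan3 (b :: c :: rest)
  | _ => 0

def solution_alt (A : List Int) : Int :=
  scan3 (PySem.List.sorted A (fun x => x) false)

-- ===== PRECONDITION & SPEC =====
def Spec_solution (A : List Int) (out : Int) : Prop := out = solution_alt A
instance (A : List Int) (out : Int) : Decidable (Spec_solution A out) := by unfold Spec_solution; infer_instance

-- ===== CLAIM (what is proved, stated in full; the proofs are below) =====
def Claim_equal_solution : Prop := ∀ (A : List Int), Dom_solution A → Spec_solution A (solution A)

-- ===== LEMMAS AND PROOFS =====

def Tri (x y z : Int) : Prop := x + y > z ∧ y + z > x ∧ x + z > y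

theorem triCond_iff (x y z : Int) : triCond (x, y, z) = true ↔ Tri x y z := by
  simp [triCond, Tri, and_assoc]

theorem foldl_triCond (l : List (Int × Int × Int)) (acc : Int) :
    l.foldl (fun triangle tr => if triCond tr then 1 else triangle) acc
      = if l.any triCond then 1 else acc := by
  induction l generalizing acc with
  | nil => simp
  | cons hd tl ih =>
    simp only [List.foldl_cons, List.any_cons, ih]
    by_cases h : triCond hd = true <;> by_cases h2 : tl.any triCond = true <;> simp [h, h2]

theorem mem_pairs2 (l : List Int) (y z : Int) :
    (y, z) ∈ pairs2 l ↔ List.Sublist [y, z] l := by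
  induction l with
  | nil => simp [pairs2]
  | cons a t ih =>
    simp only [pairs2, List.mem_append, List.mem_map, ih]
    constructor
    · rintro (⟨w, hw, heq⟩ | h)
      · cases heq
        exact (List.cons_sublist_cons).2 (List.singleton_sublist.2 hw)
      · exact h.cons a
    · intro h
      rcases List.sublist_cons_iff.1 h with hs | ⟨r, heq, hs⟩
      · exact Or.inr hs
      · obtain ⟨rfl, rfl⟩ := List.cons_eq_cons.1 heq
        exact Or.inl ⟨z, List.singleton_sublist.1 hs, rfl⟩

theorem mem_combos3 (l : List Int) (x y z : Int) :
    (x, y, z) ∈ combos3 l ↔ List.Sublist [x, y, z] l := by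
  induction l with
  | nil => simp [combos3]
  | cons a t ih =>
    simp only [combos3, List.mem_append, List.mem_map, ih]
    constructor
    · rintro (⟨w, hw, heq⟩ | h)
      · obtain ⟨w1, w2⟩ := w
        simp only [Prod.mk.injEq] at heq
        obtain ⟨rfl, rfl, rfl⟩ := heq
        exact (List.cons_sublist_cons).2 ((mem_pairs2 t _ _).1 hw)
      · exact h.cons a
    · intro h
      rcases List.sublist_cons_iff.1 h with hs | ⟨r, heq, hs⟩
      · exact Or.inr hs
      · obtain ⟨rfl, rfl⟩ := List.cons_eq_cons.1 heq
        exact Or.inl ⟨(y, z), (mem_pairs2 t y z).2 hs, rfl⟩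

theorem removeLoop_sublist (xs : List Int) (i : Nat) : List.Sublist (removeLoop xs i) xs := by
  induction xs, i using removeLoop.induct with
  | case1 xs i h hneg ih =>
    rw [removeLoop, dif_pos h, if_pos hneg]
    exact ih.trans (List.erase_sublist)
  | case2 xs i h hneg ih =>
    rw [removeLoop, dif_pos h, if_neg hneg]
    exact ih
  | case3 xs i h =>
    rw [removeLoop, dif_neg h]

theorem removeLoop_count (xs : List Int) (i : Nat) (v : Int) (hv : 0 ≤ v) :
    (removeLoop xs i).count v = xs.count v := by
  induction xs, i using removeLoop.induct with
  | case1 xs i h hneg ih =>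
    rw [removeLoop, dif_pos h, if_pos hneg, ih]
    exact List.count_erase_of_ne (by intro he; rw [he] at hv; omega)
  | case2 xs i h hneg ih =>
    rw [removeLoop, dif_pos h, if_neg hneg, ih]
  | case3 xs i h =>
    rw [removeLoop, dif_neg h]

theorem filter_removeLoop (xs : List Int) :
    (removeLoop xs 0).filter (fun v => decide (0 ≤ v))
      = xs.filter (fun v => decide (0 ≤ v)) := by
  have hsub : List.Sublist ((removeLoop xs 0).filter (fun v => decide (0 ≤ v)))
      (xs.filter (fun v => decide (0 ≤ v))) :=
    (removeLoop_sublist xs 0).filter _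
  refine hsub.eq_of_length ?_
  have hperm : ((removeLoop xs 0).filter (fun v => decide (0 ≤ v))).Perm
      (xs.filter (fun v => decide (0 ≤ v))) := by
    rw [List.perm_iff_count]
    intro a
    by_cases ha : 0 ≤ a
    · rw [List.count_filter (by simpa using ha), List.count_filter (by simpa using ha),
        removeLoop_count xs 0 a ha]
    · rw [List.count_eq_zero.2 (by simp [List.mem_filter]; intro _; omega),
        List.count_eq_zero.2 (by simp [List.mem_filter]; intro _; omega)]
  exact hperm.length_eq

theorem scan3_zero_or_one (l : List Int) : scan3 l = 0 ∨ scan3 l = 1 := by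
  induction l with
  | nil => simp [scan3]
  | cons a t ih =>
    match t, ih with
    | [], _ => simp [scan3]
    | [b], _ => simp [scan3]
    | b :: c :: rest, ih =>
      rw [scan3]
      split
      · exact Or.inr rfl
      · exact ih

theorem scan3_cons_one (x : Int) (l : List Int) (h : scan3 l = 1) : scan3 (x :: l) = 1 := by
  match l with
  | [] => simp [scan3] at h
  | [b] => simp [scan3] at h
  | b :: c :: rest =>
    rw [scan3]
    split
    · rfl
    · exact h

-- hard direction, innermost: c somewhere in the tail, x+y already big enough
theorem scan3_of_mem (rest : List Int) (x y c : Int)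
    (hp : (x :: y :: rest).Pairwise (· ≤ ·)) (hc : c ∈ rest) (hbig : x + y > c) :
    scan3 (x :: y :: rest) = 1 := by
  induction rest generalizing x y with
  | nil => simp at hc
  | cons z rest' ih =>
    rw [scan3]
    split
    · rfl
    · rename_i hxyz
      rcases List.mem_cons.1 hc with rfl | hc
      · omega
      · have hxz : x ≤ z := (List.pairwise_cons.1 hp).1 z (by simp)
        have hp' : (y :: z :: rest').Pairwise (· ≤ ·) := (List.pairwise_cons.1 hp).2
        exact ih y z hp' hc (by omega)

theorem scan3_of_pair (rest : List Int) (x b c : Int)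
    (hp : (x :: rest).Pairwise (· ≤ ·)) (hs : List.Sublist [b, c] rest) (hbig : x + b > c) :
    scan3 (x :: rest) = 1 := by
  induction rest generalizing x with
  | nil => simp at hs
  | cons y rest' ih =>
    rcases List.sublist_cons_iff.1 hs with hs' | ⟨r, heq, hcs⟩
    · have hxy : x ≤ y := (List.pairwise_cons.1 hp).1 y (by simp)
      have hp' : (y :: rest').Pairwise (· ≤ ·) := (List.pairwise_cons.1 hp).2
      exact scan3_cons_one x _ (ih y hp' hs' (by omega))
    · obtain ⟨rfl, rfl⟩ := List.cons_eq_cons.1 heq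
      exact scan3_of_mem rest' x _ c hp (List.singleton_sublist.1 hcs) hbig

theorem scan3_of_sublist (s : List Int) (a b c : Int)
    (hp : s.Pairwise (· ≤ ·)) (hs : List.Sublist [a, b, c] s) (hbig : a + b > c) :
    scan3 s = 1 := by
  induction s with
  | nil => simp at hs
  | cons x t ih =>
    rcases List.sublist_cons_iff.1 hs with hs' | ⟨r, heq, hcs⟩
    · exact scan3_cons_one x t (ih (List.pairwise_cons.1 hp).2 hs')
    · obtain ⟨rfl, rfl⟩ := List.cons_eq_cons.1 heq
      exact scan3_of_pair t _ _ _ hp hcs hbig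

theorem scan3_one_exists (l : List Int) (h : scan3 l = 1) :
    ∃ a b c, List.Sublist [a, b, c] l ∧ a + b > c := by
  induction l with
  | nil => simp [scan3] at h
  | cons x t ih =>
    match t, ih with
    | [], _ => simp [scan3] at h
    | [b], _ => simp [scan3] at h
    | b :: c :: rest, ih =>
      rw [scan3] at h
      split at h
      · exact ⟨x, b, c, (List.cons_sublist_cons).2 ((List.cons_sublist_cons).2
          ((List.cons_sublist_cons).2 (List.nil_sublist rest))), by assumption⟩
      · obtain ⟨a', b', c', hsub, hbig⟩ := ih h
        exact ⟨a', b', c', hsub.cons x, hbig⟩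

theorem list_len3 (l : List Int) (h : l.length = 3) : ∃ a b c, l = [a, b, c] := by
  match l with
  | [a, b, c] => exact ⟨a, b, c, rfl⟩

theorem tri_perm (a b c x y z : Int) (hp : ([a, b, c] : List Int).Perm [x, y, z])
    (ht : Tri x y z) : Tri a b c := by
  have hsum : a + b + c = x + y + z := by
    have := hp.sum_eq
    simp at this
    omega
  have ha : a = x ∨ a = y ∨ a = z := by
    have : a ∈ ([x, y, z] : List Int) := hp.mem_iff.1 (by simp)
    simpa using this
  have hb : b = x ∨ b = y ∨ b = z := by
    have : b ∈ ([x, y, z] : List Int) := hp.mem_iff.1 (by simp)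
    simpa using this
  have hc : c = x ∨ c = y ∨ c = z := by
    have : c ∈ ([x, y, z] : List Int) := hp.mem_iff.1 (by simp)
    simpa using this
  obtain ⟨h1, h2, h3⟩ := ht
  refine ⟨?_, ?_, ?_⟩
  · rcases hc with rfl | rfl | rfl <;> omega
  · rcases ha with rfl | rfl | rfl <;> omega
  · rcases hb with rfl | rfl | rfl <;> omega

-- the common characterisation: some 3-element sub-multiset of l is a triangle
def HasTri (l : List Int) : Prop := ∃ x y z, List.Sublist [x, y, z] l ∧ Tri x y z

theorem hasTri_of_perm (l l' : List Int) (hp : l.Perm l') (h : HasTri l) : HasTri l' := by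
  obtain ⟨x, y, z, hs, ht⟩ := h
  obtain ⟨w, hw, hws⟩ := (hs.subperm.trans hp.subperm : List.Subperm [x, y, z] l')
  obtain ⟨a, b, c, rfl⟩ := list_len3 w (by simpa using hw.length_eq)
  exact ⟨a, b, c, hws, tri_perm a b c x y z hw ht⟩

theorem hasTri_removeLoop (A : List Int) : HasTri (removeLoop A 0) ↔ HasTri A := by
  constructor
  · rintro ⟨x, y, z, hs, ht⟩
    exact ⟨x, y, z, hs.trans (removeLoop_sublist A 0), ht⟩
  · rintro ⟨x, y, z, hs, ht⟩
    have hpos : 0 < x ∧ 0 < y ∧ 0 < z := by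
      obtain ⟨h1, h2, h3⟩ := ht; refine ⟨by omega, by omega, by omega⟩
    have hfil : ([x, y, z] : List Int).filter (fun v => decide (0 ≤ v)) = [x, y, z] :=
      List.filter_eq_self.2 (by
        intro a ha
        simp only [List.mem_cons, List.not_mem_nil, or_false] at ha
        rcases ha with rfl | rfl | rfl <;> simpa using (by omega : (0 : Int) ≤ a))
    have hmid : List.Sublist [x, y, z] ((removeLoop A 0).filter (fun v => decide (0 ≤ v))) := by
      rw [filter_removeLoop, ← hfil]
      exact hs.filter _
    exact ⟨x, y, z, hmid.trans List.filter_sublist, ht⟩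

theorem scan3_sorted_iff (A : List Int) :
    scan3 (PySem.List.sorted A (fun x => x) false) = 1 ↔ HasTri A := by
  have hperm : (PySem.List.sorted A (fun x => x) false).Perm A :=
    PySem.List.sorted_perm A (fun x => x) false
  have hpw : (PySem.List.sorted A (fun x => x) false).Pairwise (· ≤ ·) := by
    have := PySem.List.sorted_pairwise (xs := A) (key := fun x : Int => x)
    simpa using this
  constructor
  · intro h
    obtain ⟨a, b, c, hs, hbig⟩ := scan3_one_exists _ h
    have hord := hpw.sublist hs
    simp [List.pairwise_cons] at hord
    have ht : Tri a b c := ⟨hbig, by omega, by omega⟩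
    exact hasTri_of_perm _ _ hperm ⟨a, b, c, hs, ht⟩
  · intro h
    obtain ⟨x, y, z, hs, ht⟩ := hasTri_of_perm _ _ hperm.symm h
    exact scan3_of_sublist _ x y z hpw hs ht.1

theorem solution_eq_indicator (A : List Int) :
    solution A = if (combos3 (removeLoop A 0)).any triCond then 1 else 0 := by
  unfold solution
  by_cases hlen : (removeLoop A 0).length < 3
  · rw [if_pos hlen]
    have hany : (combos3 (removeLoop A 0)).any triCond = false := by
      rw [List.any_eq_false]
      rintro ⟨x, y, z⟩ hmem
      have := ((mem_combos3 _ x y z).1 hmem).length_le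
      simp at this
      omega
    rw [hany]
    rfl
  · rw [if_neg hlen, foldl_triCond]

theorem any_combos3_iff (l : List Int) :
    (combos3 l).any triCond = true ↔ HasTri l := by
  rw [List.any_eq_true]
  constructor
  · rintro ⟨⟨x, y, z⟩, hmem, hcond⟩
    exact ⟨x, y, z, (mem_combos3 l x y z).1 hmem, (triCond_iff x y z).1 hcond⟩
  · rintro ⟨x, y, z, hs, ht⟩
    exact ⟨(x, y, z), (mem_combos3 l x y z).2 hs, (triCond_iff x y z).2 ht⟩

-- ===== VERDICT (by name: the statement is the Claim_ definition above) =====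
theorem solution_spec : Claim_equal_solution := by
  intro A _
  unfold Spec_solution solution_alt
  rw [solution_eq_indicator]
  by_cases h : HasTri A
  · rw [if_pos ((any_combos3_iff _).2 ((hasTri_removeLoop A).2 h))]
    exact ((scan3_sorted_iff A).2 h).symm
  · rw [if_neg (fun hc => h ((hasTri_removeLoop A).1 ((any_combos3_iff _).1 hc)))]
    rcases scan3_zero_or_one (PySem.List.sorted A (fun x => x) false) with h0 | h1
    · exact h0.symm
    · exact absurd ((scan3_sorted_iff A).1 h1) h
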